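-- pv_equiv track=rewrite | github.com/xqtr/telnite | pycrt.py | stripmci
-- ===== SOURCE A (Python) =====
-- def stripmci(s):
--   i = 0
--   val = ''
--   inpipe = False
--   while i < len(s):
--     if len(s) - i > 2:
--       if s[i] == '|' and s[i+1].isnumeric() and s[i+2].isnumeric():
--         i+=2
--       else:
--         val += s[i]
--     else:
--       val += s[i]
--
--     i+=1
--   return val
-- ===== SOURCE B (Python) =====
-- def stripmci(s):
--   parts = s.split('|')
--   out = [parts[0]]
--   for seg in parts[1:]:
--     if len(seg) >= 2 and seg[0].isnumeric() and seg[1].isnumeric():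
--       out.append(seg[2:])
--     else:
--       out.append('|' + seg)
--   return ''.join(out)
-- ===== Notes on version B (the rewrite author's own statement) =====
-- stated objective: faster
-- what changed: Replaces the index-based while loop that grows the result one character at a time by character-wise concatenation with a single split on the pipe character, classifying each segment's first two characters and joining the pieces once.
import Mathlib
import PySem

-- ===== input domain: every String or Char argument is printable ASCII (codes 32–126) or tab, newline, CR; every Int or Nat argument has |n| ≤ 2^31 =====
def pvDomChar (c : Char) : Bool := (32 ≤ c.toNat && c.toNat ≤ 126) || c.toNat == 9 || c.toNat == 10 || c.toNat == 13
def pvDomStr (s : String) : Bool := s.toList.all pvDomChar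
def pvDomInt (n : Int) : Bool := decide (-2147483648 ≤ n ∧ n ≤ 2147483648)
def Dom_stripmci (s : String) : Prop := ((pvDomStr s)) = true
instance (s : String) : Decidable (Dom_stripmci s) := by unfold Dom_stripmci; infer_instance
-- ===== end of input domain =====

-- B strips |NN color codes by splitting on '|' once and classifying segments, instead of A's
-- index-based while loop with lookahead; same return value, different decomposition.
-- '.isnumeric()' is ported as Char.isDigit, exact on the printable-ASCII domain.

-- ===== PORT A =====
-- A's while loop: first argument is the suffix s[i:], val the accumulator.
-- The 'len(s) - i > 2' test is exactly "at least three chars remain": the middle pattern;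
-- the final catch-all is the 'else: val += s[i]' branch (fewer than three chars left).
def stripmciLoop : List Char → List Char → List Char
  | [], val => val
  | c :: a :: b :: rest', val =>
    if c = '|' ∧ a.isDigit ∧ b.isDigit then stripmciLoop rest' val
    else stripmciLoop (a :: b :: rest') (val ++ [c])
  | c :: rest, val => stripmciLoop rest (val ++ [c])

def stripmci (s : String) : String := String.ofList (stripmciLoop s.toList [])

-- ===== PORT B =====
-- hand port of s.split('|') (single-char separator), exact
def pySplitPipe : List Char → List (List Char)
  | [] => [[]]
  | c :: t =>
    if c = '|' then [] :: pySplitPipe t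
    else
      match pySplitPipe t with
      | [] => [[c]]  -- unreachable: pySplitPipe never returns []
      | h :: r => (c :: h) :: r

-- body of B's for-loop: classify one segment that followed a pipe
def stripmciSeg (seg : List Char) : List Char :=
  match seg with
  | a :: b :: t => if a.isDigit ∧ b.isDigit then t else '|' :: seg
  | _ => '|' :: seg

def stripmci_alt (s : String) : String :=
  match pySplitPipe s.toList with
  | [] => ""  -- unreachable: split always returns at least one segment
  | p :: ps => String.ofList (p ++ (ps.map stripmciSeg).flatten)

-- ===== PRECONDITION & SPEC =====
def Spec_stripmci (s : String) (out : String) : Prop := out = stripmci_alt s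
instance (s : String) (out : String) : Decidable (Spec_stripmci s out) := by unfold Spec_stripmci; infer_instance

-- ===== CLAIM (what is proved, stated in full; the proofs are below) =====
def Claim_equal_stripmci : Prop := ∀ (s : String), Dom_stripmci s → Spec_stripmci s (stripmci s)

-- ===== LEMMAS AND PROOFS =====

-- B's result as a function of the character list
def stripmciB (cs : List Char) : List Char :=
  match pySplitPipe cs with
  | [] => []
  | p :: ps => p ++ (ps.map stripmciSeg).flatten

theorem pySplitPipe_ne_nil (cs : List Char) : pySplitPipe cs ≠ [] := by
  cases cs with
  | nil => simp [pySplitPipe]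
  | cons c t =>
    simp only [pySplitPipe]
    split
    · simp
    · cases h : pySplitPipe t <;> simp

theorem stripmciB_cons (c : Char) (t : List Char) (hc : c ≠ '|') :
    stripmciB (c :: t) = c :: stripmciB t := by
  unfold stripmciB
  simp only [pySplitPipe, if_neg hc]
  cases h : pySplitPipe t with
  | nil => exact absurd h (pySplitPipe_ne_nil t)
  | cons p ps => simp

theorem stripmciB_pipe (t : List Char) :
    stripmciB ('|' :: t) = ((pySplitPipe t).map stripmciSeg).flatten := by
  unfold stripmciB
  simp [pySplitPipe]

theorem pipe_not_digit : ('|' : Char).isDigit = false := by decide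

theorem loop_eq (n : Nat) : ∀ (cs acc : List Char), cs.length ≤ n →
    stripmciLoop cs acc = acc ++ stripmciB cs := by
  induction n with
  | zero =>
    intro cs acc h
    have : cs = [] := List.eq_nil_of_length_eq_zero (Nat.le_zero.mp h)
    subst this
    simp [stripmciLoop, stripmciB, pySplitPipe]
  | succ n ih =>
    intro cs acc h
    cases cs with
    | nil => simp [stripmciLoop, stripmciB, pySplitPipe]
    | cons c rest =>
      simp only [List.length_cons] at h
      by_cases hc : c = '|'
      · subst hc
        cases rest with
        | nil =>
          simp [stripmciLoop, stripmciB, pySplitPipe, stripmciSeg]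
        | cons a t =>
          cases t with
          | nil =>
            by_cases ha : a = '|' <;>
              simp [stripmciLoop, stripmciB, pySplitPipe, stripmciSeg, ha]
          | cons b t' =>
            simp only [List.length_cons] at h
            by_cases hnum : a.isDigit ∧ b.isDigit
            · rw [show stripmciLoop ('|' :: a :: b :: t') acc = stripmciLoop t' acc from by
                simp [stripmciLoop, hnum.1, hnum.2]]
              rw [ih t' acc (by omega), stripmciB_pipe]
              have ha' : a ≠ '|' := by
                intro e; rw [e] at hnum; simp [pipe_not_digit] at hnum
              have hb' : b ≠ '|' := by
                intro e; rw [e] at hnum; simp [pipe_not_digit] at hnum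
              simp only [pySplitPipe, if_neg ha', if_neg hb']
              cases hsp : pySplitPipe t' with
              | nil => exact absurd hsp (pySplitPipe_ne_nil t')
              | cons p ps =>
                simp [stripmciSeg, hnum.1, hnum.2, stripmciB, hsp]
            · rw [show stripmciLoop ('|' :: a :: b :: t') acc
                    = stripmciLoop (a :: b :: t') (acc ++ ['|']) from by
                simp only [stripmciLoop]
                rw [if_neg (by rintro ⟨-, x, y⟩; exact hnum ⟨x, y⟩)]]
              rw [ih (a :: b :: t') _ (by simp; omega), stripmciB_pipe]
              by_cases ha : a = '|'
              · subst ha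
                simp [pySplitPipe, stripmciSeg, stripmciB_pipe]
              · by_cases hb : b = '|'
                · subst hb
                  simp [pySplitPipe, if_neg ha, stripmciSeg, stripmciB_cons _ _ ha,
                    stripmciB_pipe]
                · simp only [pySplitPipe, if_neg ha, if_neg hb]
                  cases hsp : pySplitPipe t' with
                  | nil => exact absurd hsp (pySplitPipe_ne_nil t')
                  | cons p ps =>
                    simp [stripmciSeg, hnum, stripmciB, pySplitPipe, if_neg ha, if_neg hb, hsp]
      · have key : stripmciLoop (c :: rest) acc = stripmciLoop rest (acc ++ [c]) := by
          cases rest with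
          | nil => simp [stripmciLoop]
          | cons a t =>
            cases t with
            | nil => simp [stripmciLoop]
            | cons b t' =>
              simp only [stripmciLoop]
              rw [if_neg (by rintro ⟨e, -⟩; exact hc e)]
        rw [key, ih rest _ (by omega), stripmciB_cons c rest hc]
        simp

-- ===== VERDICT (by name: the statement is the Claim_ definition above) =====
theorem stripmci_spec : Claim_equal_stripmci := by
  intro s _
  unfold Spec_stripmci stripmci stripmci_alt
  rw [loop_eq s.toList.length s.toList [] (le_refl _)]
  unfold stripmciB
  cases h : pySplitPipe s.toList with
  | nil => exact absurd h (pySplitPipe_ne_nil s.toList)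
  | cons p ps => simp
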